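-- pv_equiv track=rewrite | github.com/MrBrantCode/unitest_baseline | mut_generate/mist_train_taco/taco_13465/solution.py | count_goldbach_combinations
-- ===== SOURCE A (Python) =====
-- def sieve_of_eratosthenes(limit):
--     """Generate a list of primes up to the given limit using the Sieve of Eratosthenes."""
--     sieve = [True] * (limit + 1)
--     sieve[0] = sieve[1] = False
--     for start in range(2, int(limit**0.5) + 1):
--         if sieve[start]:
--             for multiple in range(start*start, limit + 1, start):
--                 sieve[multiple] = False
--     return [num for num, is_prime in enumerate(sieve) if is_prime]
--
-- def count_goldbach_combinations(n):
--     """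
--     Count the number of combinations of two prime numbers that sum up to the given integer n.
--
--     Parameters:
--     n (int): The integer for which to count the combinations.
--
--     Returns:
--     int: The number of combinations of two prime numbers that sum up to n.
--     """
--     if n < 4 or n > 50000:
--         raise ValueError("n must be between 4 and 50000 inclusive.")
--
--     primes = sieve_of_eratosthenes(n)
--     prime_set = set(primes)
--     count = 0
--
--     for prime in primes:
--         if prime > n // 2:
--             break
--         if (n - prime) in prime_set:
--             count += 1
--
--     return count
-- ===== SOURCE B (Python) =====
-- def count_goldbach_combinations(n):
--     """Count pairs (p, n-p) of primes with p <= n//2, by on-demand trial division."""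
--     if n < 4 or n > 50000:
--         raise ValueError("n must be between 4 and 50000 inclusive.")
--
--     def is_prime(m):
--         if m < 2:
--             return False
--         for i in range(2, int(m**0.5) + 1):
--             if m % i == 0:
--                 return False
--         return True
--
--     count = 0
--     for p in range(2, n // 2 + 1):
--         if is_prime(p) and is_prime(n - p):
--             count += 1
--     return count
-- ===== Notes on version B (the rewrite author's own statement) =====
-- stated objective: simpler
-- what changed: Replaces the precomputed sieve + prime set + break-on-midpoint scan by a single loop over 2..n//2 that tests p and n-p for primality with on-demand trial division.
import Mathlib
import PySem

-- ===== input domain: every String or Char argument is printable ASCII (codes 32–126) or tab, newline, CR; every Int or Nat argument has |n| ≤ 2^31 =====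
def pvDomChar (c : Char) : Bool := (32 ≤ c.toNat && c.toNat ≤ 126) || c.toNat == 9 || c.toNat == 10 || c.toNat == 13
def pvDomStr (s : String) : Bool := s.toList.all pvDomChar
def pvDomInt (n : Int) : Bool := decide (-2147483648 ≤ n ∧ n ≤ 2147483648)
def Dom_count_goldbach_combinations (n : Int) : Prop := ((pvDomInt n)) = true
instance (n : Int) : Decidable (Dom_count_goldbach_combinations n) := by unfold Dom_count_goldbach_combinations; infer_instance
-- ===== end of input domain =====

-- B replaces A's sieve + prime-set + break-scan by one loop over 2..n//2 with trial-division
-- primality tests: simpler (shorter, no precomputed tables), not faster.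

-- ===== PORT A =====
-- inner loop 'for multiple in range(start*start, limit+1, start): sieve[multiple] = False'
def pvMark (s : List Bool) (ms : List Nat) : List Bool := ms.foldl (fun t m => t.set m false) s

-- range(start*start, limit+1, start) for start ≥ 1: this count is exactly Python's
-- max(0, ceil((limit+1 - start*start)/start)); indices are nonnegative Python ints, kept as Nat
def pvMultiples (limit start : Nat) : List Nat :=
  List.range' (start * start) ((limit + 1 - start * start + (start - 1)) / start) start

-- one iteration of the outer sieve loop
def pvSieveStep (limit : Nat) (s : List Bool) (start : Nat) : List Bool :=
  if s.getD start false then pvMark s (pvMultiples limit start) else s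

-- int(limit**0.5) = Nat.sqrt limit exactly for limit ≤ 2^31 (the input domain); the final
-- '[num for num, is_prime in enumerate(sieve) if is_prime]' keeps exactly the indices whose
-- entry is true, i.e. this filter over the index range (all indices are nonnegative Python ints)
def sieve_of_eratosthenes (limit : Nat) : List Nat :=
  let sf := (List.range' 2 (Nat.sqrt limit + 1 - 2)).foldl (pvSieveStep limit)
      (((List.replicate (limit + 1) true).set 0 false).set 1 false)
  (List.range sf.length).filter (fun num => sf.getD num false)

-- 'for prime in primes: if prime > n//2: break; if (n - prime) in prime_set: count += 1'
def pvGoldLoop (half N : Nat) (pset : PySem.Set Nat) : List Nat → Int → Int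
  | [], c => c
  | p :: rest, c =>
      if half < p then c
      else pvGoldLoop half N pset rest (if (N - p) ∈ pset then c + 1 else c)

def count_goldbach_combinations (n : Int) : Int :=
  if n < 4 ∨ 50000 < n then 0  -- Python A raises ValueError here (excluded by Pre_)
  else
    let N := n.toNat
    let primes := sieve_of_eratosthenes N
    pvGoldLoop (N / 2) N (PySem.Set.ofList primes) primes 0

-- ===== PORT B =====
-- is_prime by trial division; int(m**0.5) = Nat.sqrt m exactly for m ≤ 2^31 (the input domain);
-- the early-return loop over range(2, int(m**0.5)+1) is the 'all' over that range
def pvIsPrime (m : Nat) : Bool :=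
  if m < 2 then false
  else (List.range' 2 (Nat.sqrt m + 1 - 2)).all (fun i => m % i != 0)

def count_goldbach_combinations_alt (n : Int) : Int :=
  if n < 4 ∨ 50000 < n then 0  -- Python B raises ValueError here too (excluded by Pre_)
  else
    let N := n.toNat
    (List.range' 2 (N / 2 + 1 - 2)).foldl
      (fun c p => if pvIsPrime p && pvIsPrime (N - p) then c + 1 else c) 0

-- ===== PRECONDITION & SPEC =====
-- exactly the inputs on which Python A returns normally (otherwise it raises ValueError)
def Pre_count_goldbach_combinations (n : Int) : Prop := 4 ≤ n ∧ n ≤ 50000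
instance (n : Int) : Decidable (Pre_count_goldbach_combinations n) := by
  unfold Pre_count_goldbach_combinations; infer_instance

def pvWitness_count_goldbach_combinations : Int := 10

def Spec_count_goldbach_combinations (n : Int) (out : Int) : Prop := out = count_goldbach_combinations_alt n
instance (n : Int) (out : Int) : Decidable (Spec_count_goldbach_combinations n out) := by unfold Spec_count_goldbach_combinations; infer_instance

-- ===== CLAIM (what is proved, stated in full; the proofs are below) =====
def Claim_equal_count_goldbach_combinations : Prop := ∀ (n : Int), Dom_count_goldbach_combinations n → Pre_count_goldbach_combinations n → Spec_count_goldbach_combinations n (count_goldbach_combinations n)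

-- ===== LEMMAS AND PROOFS =====

-- B side: pvIsPrime decides primality
theorem getD_set_false (s : List Bool) (a i : Nat) :
    (s.set a false).getD i false = if i = a then false else s.getD i false := by
  simp only [List.getD_eq_getElem?_getD, List.getElem?_set]
  split_ifs with h1 h2 h3 <;> (try simp_all) <;> rw [List.getElem?_eq_none (by omega)] <;> rfl

theorem pvIsPrime_iff (m : Nat) : pvIsPrime m = true ↔ Nat.Prime m := by
  by_cases h2 : m < 2
  · simp only [pvIsPrime, if_pos h2, Bool.false_eq_true, false_iff]
    intro hp; exact absurd hp.two_le (by omega)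
  · push_neg at h2
    have hsq : 1 ≤ Nat.sqrt m := Nat.le_sqrt.mpr (by omega)
    simp only [pvIsPrime, if_neg (by omega : ¬ m < 2), List.all_eq_true, List.mem_range'_1,
      bne_iff_ne, ne_eq]
    constructor
    · intro h
      rw [Nat.prime_def_le_sqrt]
      refine ⟨h2, fun k hk hk' hdvd => ?_⟩
      have hke : m % k = 0 := Nat.mod_eq_zero_of_dvd hdvd
      exact h k ⟨hk, by omega⟩ hke
    · intro hp i hi
      have := (Nat.prime_def_le_sqrt.mp hp).2 i hi.1 (by omega)
      intro hmod
      exact this (Nat.dvd_of_mod_eq_zero hmod)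

-- A side: length bookkeeping
theorem pvMark_length (ms : List Nat) (s : List Bool) : (pvMark s ms).length = s.length := by
  induction ms generalizing s with
  | nil => rfl
  | cons a t ih => simp [pvMark, List.foldl] at ih ⊢; rw [ih]; simp

theorem sieveFold_length (limit : Nat) (l : List Nat) (s : List Bool) :
    (l.foldl (pvSieveStep limit) s).length = s.length := by
  induction l generalizing s with
  | nil => rfl
  | cons a t ih =>
      simp only [List.foldl]
      rw [ih]
      unfold pvSieveStep
      split
      · exact pvMark_length _ _
      · rfl

-- getD after marking a list of indices false
theorem pvMark_getD (ms : List Nat) (s : List Bool) (i : Nat) :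
    (pvMark s ms).getD i false = if i ∈ ms then false else s.getD i false := by
  induction ms generalizing s with
  | nil => simp [pvMark]
  | cons a t ih =>
      show (pvMark (s.set a false) t).getD i false = _
      rw [ih, getD_set_false]
      by_cases h1 : i ∈ t <;> by_cases h2 : i = a <;> simp [h1, h2]

-- membership in the inner multiples range
theorem mem_pvMultiples (limit start m : Nat) (hs : 1 ≤ start) :
    m ∈ pvMultiples limit start ↔ start ∣ m ∧ start * start ≤ m ∧ m ≤ limit := by
  unfold pvMultiples
  rw [List.mem_range']
  constructor
  · rintro ⟨i, hi, rfl⟩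
    refine ⟨⟨start + i, by ring⟩, Nat.le_add_right _ _, ?_⟩
    rw [Nat.lt_iff_add_one_le, Nat.le_div_iff_mul_le (by omega)] at hi
    have e1 : (i + 1) * start = start * i + start := by ring
    rw [e1] at hi
    revert hi
    generalize start * start = A
    generalize start * i = B
    intro hi; omega
  · rintro ⟨⟨t, rfl⟩, hsq, hle⟩
    have ht : start ≤ t := Nat.le_of_mul_le_mul_left hsq (by omega)
    obtain ⟨k, rfl⟩ := Nat.exists_eq_add_of_le ht
    refine ⟨k, ?_, by ring⟩
    rw [Nat.lt_iff_add_one_le, Nat.le_div_iff_mul_le (by omega)]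
    have e1 : (k + 1) * start = start * k + start := by ring
    have e2 : start * (start + k) = start * start + start * k := by ring
    rw [e1]
    rw [e2] at hle
    revert hle hsq
    generalize start * start = A
    generalize start * k = B
    intro hle hsq; omega

-- the sieve invariant: after processing starts 2..j+1, entry m (m ≤ limit) is true iff
-- m ≥ 2 and no prime p ≤ j+1 with p*p ≤ m divides m
theorem sieve_inv (limit : Nat) (j : Nat) (m : Nat) (hm : m ≤ limit) :
    ((List.range' 2 j).foldl (pvSieveStep limit)
        (((List.replicate (limit + 1) true).set 0 false).set 1 false)).getD m false = true ↔
      (2 ≤ m ∧ ∀ p, Nat.Prime p → p ≤ j + 1 → p ∣ m → ¬(p * p ≤ m)) := by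
  induction j generalizing m with
  | zero =>
      simp only [List.range'_zero, List.foldl_nil]
      rw [getD_set_false, getD_set_false]
      constructor
      · intro h
        refine ⟨?_, fun p hp hple _ _ => absurd hp.two_le (by omega)⟩
        by_contra hlt
        rcases (by omega : m = 0 ∨ m = 1) with rfl | rfl <;> simp at h
      · rintro ⟨h2m, -⟩
        rw [if_neg (by omega), if_neg (by omega), List.getD_eq_getElem?_getD,
          List.getElem?_replicate, if_pos (by omega)]
        rfl
  | succ j ih =>
      rw [List.range'_concat, List.foldl_append, List.foldl_cons, List.foldl_nil]
      have hidx : 2 + 1 * j = j + 2 := by ring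
      rw [hidx]
      have hlen : ((List.range' 2 j).foldl (pvSieveStep limit)
          (((List.replicate (limit + 1) true).set 0 false).set 1 false)).length = limit + 1 := by
        rw [sieveFold_length]; simp
      by_cases hb : ((List.range' 2 j).foldl (pvSieveStep limit)
          (((List.replicate (limit + 1) true).set 0 false).set 1 false)).getD (j + 2) false = true
      · rw [pvSieveStep, if_pos hb]
        have hsl : j + 2 ≤ limit := by
          by_contra hgt
          rw [List.getD_eq_default _ _ (by omega)] at hb
          simp at hb
        have hsprime : Nat.Prime (j + 2) := by
          by_contra hnp
          have h1 := (ih (j + 2) hsl).mp hb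
          have hq := Nat.minFac_prime (show (j + 2) ≠ 1 by omega)
          have hqd := Nat.minFac_dvd (j + 2)
          have hqs : (j + 2).minFac * (j + 2).minFac ≤ j + 2 := by
            have := Nat.minFac_sq_le_self (show 0 < j + 2 by omega) hnp
            simpa [pow_two] using this
          have hqle : (j + 2).minFac ≤ j + 1 := by
            have h2le := hq.two_le
            have hmul : 2 * (j + 2).minFac ≤ (j + 2).minFac * (j + 2).minFac :=
              Nat.mul_le_mul_right _ h2le
            revert hmul hqs
            generalize (j + 2).minFac * (j + 2).minFac = Q
            intro hmul hqs; omega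
          exact h1.2 _ hq hqle hqd hqs
        rw [pvMark_getD]
        constructor
        · intro h
          by_cases hc : (j + 2) ∣ m ∧ (j + 2) * (j + 2) ≤ m ∧ m ≤ limit
          · rw [if_pos ((mem_pvMultiples limit (j + 2) m (by omega)).mpr hc)] at h
            simp at h
          · rw [if_neg (fun hmem => hc ((mem_pvMultiples limit (j + 2) m (by omega)).mp hmem))] at h
            obtain ⟨h2m, hall⟩ := (ih m hm).mp h
            refine ⟨h2m, fun p hp hple hpd hpsq => ?_⟩
            rcases (by omega : p ≤ j + 1 ∨ p = j + 2) with h' | h'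
            · exact hall p hp h' hpd hpsq
            · subst h'; exact hc ⟨hpd, hpsq, hm⟩
        · rintro ⟨h2m, hall⟩
          have hc : ¬ ((j + 2) ∣ m ∧ (j + 2) * (j + 2) ≤ m ∧ m ≤ limit) := by
            rintro ⟨hd, hsq, -⟩
            exact hall (j + 2) hsprime (by omega) hd hsq
          rw [if_neg (fun hmem => hc ((mem_pvMultiples limit (j + 2) m (by omega)).mp hmem))]
          exact (ih m hm).mpr ⟨h2m, fun p hp hple hpd hpsq => hall p hp (by omega) hpd hpsq⟩
      · rw [pvSieveStep, if_neg hb, ih m hm]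
        constructor
        · rintro ⟨h2m, hall⟩
          refine ⟨h2m, fun p hp hple hpd hpsq => ?_⟩
          rcases (by omega : p ≤ j + 1 ∨ p = j + 2) with h' | h'
          · exact hall p hp h' hpd hpsq
          · subst h'
            have hsl : j + 2 ≤ limit := by
              have : j + 2 ≤ (j + 2) * (j + 2) := Nat.le_mul_of_pos_left _ (by omega)
              omega
            exact hb ((ih (j + 2) hsl).mpr ⟨by omega, fun q hq hqle hqd hqsq => by
              have := (Nat.prime_dvd_prime_iff_eq hq hp).mp hqd
              omega⟩)
        · rintro ⟨h2m, hall⟩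
          exact ⟨h2m, fun p hp hple hpd hpsq => hall p hp (by omega) hpd hpsq⟩

-- final sieve entry m (m ≤ limit) is true iff m is prime
theorem sieve_final (limit : Nat) (hl : 4 ≤ limit) (m : Nat) (hm : m ≤ limit) :
    ((List.range' 2 (Nat.sqrt limit + 1 - 2)).foldl (pvSieveStep limit)
        (((List.replicate (limit + 1) true).set 0 false).set 1 false)).getD m false = true ↔
      Nat.Prime m := by
  have hsq2 : 2 ≤ Nat.sqrt limit := Nat.le_sqrt.mpr (by omega)
  rw [show Nat.sqrt limit + 1 - 2 = Nat.sqrt limit - 1 by omega,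
    sieve_inv limit (Nat.sqrt limit - 1) m hm,
    show Nat.sqrt limit - 1 + 1 = Nat.sqrt limit by omega]
  constructor
  · rintro ⟨h2m, hall⟩
    by_contra hnp
    have hq := Nat.minFac_prime (show m ≠ 1 by omega)
    have hqs : m.minFac * m.minFac ≤ m := by
      have := Nat.minFac_sq_le_self (by omega) hnp
      simpa [pow_two] using this
    have hqle : m.minFac ≤ Nat.sqrt limit := Nat.le_sqrt.mpr (le_trans hqs hm)
    exact hall _ hq hqle (Nat.minFac_dvd m) hqs
  · intro hp
    refine ⟨hp.two_le, fun p hpp hple hpd hpsq => ?_⟩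
    have hpm : p = m := (Nat.prime_dvd_prime_iff_eq hpp hp).mp hpd
    subst hpm
    have h2 := hpp.two_le
    have hmul : 2 * p ≤ p * p := Nat.mul_le_mul_right _ h2
    revert hmul hpsq
    generalize p * p = Q
    intro hmul hpsq; omega

-- the primes list is the filter of the index range by primality
theorem sieve_primes (limit : Nat) (hl : 4 ≤ limit) :
    sieve_of_eratosthenes limit
      = (List.range (limit + 1)).filter (fun p => decide (Nat.Prime p)) := by
  unfold sieve_of_eratosthenes
  have hlen : ((List.range' 2 (Nat.sqrt limit + 1 - 2)).foldl (pvSieveStep limit)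
      (((List.replicate (limit + 1) true).set 0 false).set 1 false)).length = limit + 1 := by
    rw [sieveFold_length]; simp
  simp only [hlen]
  apply List.filter_congr
  intro a ha
  have halim : a ≤ limit := by rw [List.mem_range] at ha; omega
  rw [Bool.eq_iff_iff, decide_eq_true_eq]
  exact sieve_final limit hl a halim

theorem mem_sieve_primes (limit q : Nat) (hl : 4 ≤ limit) :
    q ∈ sieve_of_eratosthenes limit ↔ q ≤ limit ∧ Nat.Prime q := by
  rw [sieve_primes limit hl]
  simp [List.mem_filter]

-- the break-scan over a strictly sorted list counts its members ≤ half satisfying the test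
theorem pvGoldLoop_eq (half N : Nat) (pset : PySem.Set Nat) (l : List Nat)
    (hl : l.Pairwise (· < ·)) (c : Int) :
    pvGoldLoop half N pset l c
      = c + (l.countP (fun p => decide (p ≤ half) && decide ((N - p) ∈ pset)) : Int) := by
  induction l generalizing c with
  | nil => simp [pvGoldLoop]
  | cons p rest ih =>
      rw [List.pairwise_cons] at hl
      by_cases hp : half < p
      · simp only [pvGoldLoop]
        rw [if_pos hp]
        have hz : rest.countP (fun q => decide (q ≤ half) && decide ((N - q) ∈ pset)) = 0 :=
          List.countP_eq_zero.mpr (fun a hamem => by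
            have := hl.1 a hamem
            simp only [Bool.and_eq_true, decide_eq_true_eq, not_and]
            intro h; omega)
        rw [List.countP_cons, hz]
        simp [show ¬ p ≤ half by omega]
      · push_neg at hp
        simp only [pvGoldLoop]
        rw [if_neg (by omega), ih hl.2, List.countP_cons]
        by_cases hmem : (N - p) ∈ pset <;> simp [hp, hmem] <;> push_cast <;> ring_nf

-- B's fold counts
theorem foldB_eq (N : Nat) (l : List Nat) (c : Int) :
    l.foldl (fun c p => if pvIsPrime p && pvIsPrime (N - p) then c + 1 else c) c
      = c + (l.countP (fun p => pvIsPrime p && pvIsPrime (N - p)) : Int) := by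
  induction l generalizing c with
  | nil => simp
  | cons a t ih =>
      simp only [List.foldl, List.countP_cons]
      rw [ih]
      split <;> simp <;> push_cast <;> ring

-- ===== VERDICT (by name: the statement is the Claim_ definition above) =====
theorem pvIsPrime_eq (m : Nat) : pvIsPrime m = decide (Nat.Prime m) := by
  rw [Bool.eq_iff_iff, decide_eq_true_eq]
  exact pvIsPrime_iff m

theorem count_goldbach_combinations_spec : Claim_equal_count_goldbach_combinations := by
  intro n hdom hpre
  unfold Spec_count_goldbach_combinations
  obtain ⟨h4, h5⟩ := hpre
  unfold count_goldbach_combinations count_goldbach_combinations_alt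
  rw [if_neg (by omega), if_neg (by omega)]
  set N := n.toNat with hN
  have hN4 : 4 ≤ N := by omega
  set half := N / 2 with hhalf
  have hhalf2 : 2 ≤ half := by omega
  have hhalfN : half + 1 ≤ N := by omega
  have hprimes := sieve_primes N (by omega)
  have hsorted : (sieve_of_eratosthenes N).Pairwise (· < ·) := by
    rw [hprimes]; exact List.Pairwise.filter _ List.pairwise_lt_range
  rw [pvGoldLoop_eq half N _ _ hsorted 0, foldB_eq]
  have hmem : ∀ x ∈ sieve_of_eratosthenes N,
      (decide (x ≤ half) && decide ((N - x) ∈ PySem.Set.ofList (sieve_of_eratosthenes N))) = true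
        ↔ (decide (x ≤ half) && decide (Nat.Prime (N - x))) = true := by
    intro x _
    have hms : (N - x) ∈ PySem.Set.ofList (sieve_of_eratosthenes N) ↔ Nat.Prime (N - x) := by
      rw [PySem.Set.mem_ofList, mem_sieve_primes _ _ (by omega)]
      exact ⟨And.right, fun h => ⟨by omega, h⟩⟩
    simp only [Bool.and_eq_true, decide_eq_true_eq]
    tauto
  rw [List.countP_congr hmem, hprimes, List.countP_filter]
  have key : (List.range (N + 1)).countP
        (fun a => (decide (a ≤ half) && decide (Nat.Prime (N - a))) && decide (Nat.Prime a))
      = (List.range' 2 (half + 1 - 2)).countP (fun p => pvIsPrime p && pvIsPrime (N - p)) := by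
    simp only [pvIsPrime_eq]
    rw [show half + 1 - 2 = half - 1 by omega, List.range_eq_range']
    have hsplit : List.range' 0 (N + 1) = List.range' 0 (half + 1) ++ List.range' (half + 1) (N - half) := by
      rw [show N + 1 = (half + 1) + (N - half) by omega, ← List.range'_append]
      norm_num
    rw [hsplit, List.countP_append]
    have hz : (List.range' (half + 1) (N - half)).countP
        (fun a => (decide (a ≤ half) && decide (Nat.Prime (N - a))) && decide (Nat.Prime a)) = 0 :=
      List.countP_eq_zero.mpr (fun a ha => by
        rw [List.mem_range'_1] at ha
        simp only [Bool.and_eq_true, decide_eq_true_eq, not_and]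
        rintro ⟨h1, -⟩; omega)
    rw [hz, Nat.add_zero]
    have hsplit2 : List.range' 0 (half + 1) = List.range' 0 2 ++ List.range' 2 (half - 1) := by
      rw [show half + 1 = 2 + (half - 1) by omega, ← List.range'_append]
    rw [hsplit2, List.countP_append]
    have hz2 : (List.range' 0 2).countP
        (fun a => (decide (a ≤ half) && decide (Nat.Prime (N - a))) && decide (Nat.Prime a)) = 0 :=
      List.countP_eq_zero.mpr (fun a ha => by
        rw [List.mem_range'_1] at ha
        simp only [Bool.and_eq_true, decide_eq_true_eq, not_and]
        rintro ⟨-, -⟩ hp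
        exact absurd hp.two_le (by omega))
    rw [hz2, Nat.zero_add]
    apply List.countP_congr
    intro a ha
    rw [List.mem_range'_1] at ha
    simp only [Bool.and_eq_true, decide_eq_true_eq]
    constructor
    · rintro ⟨⟨-, h2⟩, h3⟩; exact ⟨h3, h2⟩
    · rintro ⟨h3, h2⟩; exact ⟨⟨by omega, h2⟩, h3⟩
  rw [key]
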